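-- pv_equiv track=rewrite | github.com/AyanArshad02/LogicBuildingWithPython | day20_reverseWordInSentence.py | reverse_each_word
-- ===== SOURCE A (Python) =====
-- def reverse_each_word(sentence):
--     # Step 1: Split the sentence into words
--     words = sentence.split()
--
--     # Step 2: Create a new list to store reversed words
--     reversed_words = []
--
--     # Step 3: Reverse each word and add to the list
--     for word in words:
--         reversed_word = word[::-1]
--         reversed_words.append(reversed_word)
--
--     # Step 4: Join the reversed words into a sentence
--     result = ' '.join(reversed_words)
--
--     return result
-- ===== SOURCE B (Python) =====
-- def reverse_each_word(sentence):
--     # Single pass over the characters: build each word reversed by prepending,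
--     # flush a finished word whenever whitespace is seen.
--     out = []
--     cur = ""
--     for ch in sentence:
--         if ch.isspace():
--             if cur:
--                 out.append(cur)
--                 cur = ""
--         else:
--             cur = ch + cur
--     if cur:
--         out.append(cur)
--     return ' '.join(out)
-- ===== Notes on version B (the rewrite author's own statement) =====
-- stated objective: alternative
-- what changed: Replaced split-then-reverse-each-word-by-slicing with a single character-level pass that builds each word already reversed by prepending and flushes it at whitespace; no split() and no slicing.
import Mathlib
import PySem

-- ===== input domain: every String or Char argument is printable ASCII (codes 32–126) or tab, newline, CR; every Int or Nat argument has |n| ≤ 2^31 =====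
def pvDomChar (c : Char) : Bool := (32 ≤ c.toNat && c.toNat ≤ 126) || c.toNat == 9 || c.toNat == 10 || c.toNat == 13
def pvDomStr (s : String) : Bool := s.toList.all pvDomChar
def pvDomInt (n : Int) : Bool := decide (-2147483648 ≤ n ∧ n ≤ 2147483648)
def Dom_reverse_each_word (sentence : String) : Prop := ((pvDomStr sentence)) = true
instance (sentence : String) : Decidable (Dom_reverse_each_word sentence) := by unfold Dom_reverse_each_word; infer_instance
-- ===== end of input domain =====

-- B replaces A's split-then-slice-reverse with a single character pass that builds each
-- word already reversed by prepending (objective: alternative; return value only).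

-- ===== PORT A =====
def reverse_each_word (sentence : String) : String :=
  -- Step 1: split the sentence into words
  let words := PySem.Str.split₀ sentence
  -- Steps 2–3: reverse each word (word[::-1]; slice? is some for step -1, getD is never hit)
  let reversed_words := words.foldl
    (fun acc word => acc ++ [(PySem.Str.slice? word none none (-1)).getD ""]) []
  -- Step 4: join
  PySem.Str.join " " reversed_words

-- ===== PORT B =====
-- loop body of B's for-loop: state = (out, cur); cur kept as List Char, 'ch + cur' = ch :: cur
def revw_step (s : List (List Char) × List Char) (ch : Char) : List (List Char) × List Char :=
  if PySem.Chars.isspace ch then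
    if s.2.isEmpty then s else (s.1 ++ [s.2], [])
  else (s.1, ch :: s.2)

def reverse_each_word_alt (sentence : String) : String :=
  let s := sentence.toList.foldl revw_step ([], [])
  let out := if s.2.isEmpty then s.1 else s.1 ++ [s.2]
  -- ' '.join(out); exact via PySem.Chars.join on the character lists
  String.ofList (PySem.Chars.join [' '] out)

-- ===== PRECONDITION & SPEC =====
def Spec_reverse_each_word (sentence : String) (out : String) : Prop := out = reverse_each_word_alt sentence
instance (sentence : String) (out : String) : Decidable (Spec_reverse_each_word sentence out) := by unfold Spec_reverse_each_word; infer_instance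

-- ===== CLAIM (what is proved, stated in full; the proofs are below) =====
def Claim_equal_reverse_each_word : Prop := ∀ (sentence : String), Dom_reverse_each_word sentence → Spec_reverse_each_word sentence (reverse_each_word sentence)

-- ===== LEMMAS AND PROOFS =====

-- A's append-fold is a map
theorem foldl_append_map {α β : Type} (f : α → β) (l : List α) (acc : List β) :
    l.foldl (fun a w => a ++ [f w]) acc = acc ++ l.map f := by
  induction l generalizing acc with
  | nil => simp
  | cons x xs ih => simp [List.foldl_cons, ih]

-- split₀.go's accumulator factors out
theorem split0_go_acc (cs : List Char) (cur : List Char) (acc : List (List Char)) :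
    PySem.Chars.split₀.go cs cur acc = acc.reverse ++ PySem.Chars.split₀.go cs cur [] := by
  induction cs generalizing cur acc with
  | nil =>
    simp only [PySem.Chars.split₀.go]
    by_cases h : cur.isEmpty <;> simp [h]
  | cons c rest ih =>
    simp only [PySem.Chars.split₀.go]
    by_cases hs : PySem.Chars.isspace c
    · by_cases h : cur.isEmpty
      · simp only [hs, h, if_true]
        exact ih [] acc
      · simp only [hs, h, if_true, Bool.false_eq_true, if_false]
        rw [ih [] (cur.reverse :: acc), ih [] [cur.reverse]]
        simp
    · simp only [hs, Bool.false_eq_true, if_false]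
      exact ih (c :: cur) acc

-- B's fold computes the reversed words of split₀
theorem revw_fold_eq (cs : List Char) (cur : List Char) (out : List (List Char)) :
    (let s := cs.foldl revw_step (out, cur);
     if s.2.isEmpty then s.1 else s.1 ++ [s.2])
    = out ++ (PySem.Chars.split₀.go cs cur []).map List.reverse := by
  induction cs generalizing cur out with
  | nil =>
    simp only [List.foldl_nil, PySem.Chars.split₀.go]
    by_cases h : cur.isEmpty <;> simp_all
  | cons c rest ih =>
    simp only [List.foldl_cons, PySem.Chars.split₀.go, revw_step]
    by_cases hs : PySem.Chars.isspace c
    · by_cases h : cur.isEmpty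
      · simp only [hs, h, if_true]
        rw [List.isEmpty_iff.mp h]
        exact ih [] out
      · simp only [hs, h, if_true, Bool.false_eq_true, if_false]
        rw [split0_go_acc rest [] [cur.reverse], ih [] (out ++ [cur])]
        simp
    · simp only [hs, Bool.false_eq_true, if_false]
      exact ih (c :: cur) out

-- ===== VERDICT (by name: the statement is the Claim_ definition above) =====
theorem reverse_each_word_spec : Claim_equal_reverse_each_word := by
  intro sentence _
  unfold Spec_reverse_each_word
  simp only [reverse_each_word, reverse_each_word_alt]
  apply String.toList_inj.mp
  rw [foldl_append_map (fun word => (PySem.Str.slice? word none none (-1)).getD "")]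
  simp only [PySem.Str.slice?_none_none_neg_one, Option.getD_some, List.nil_append]
  rw [PySem.Str.toList_join]
  rw [revw_fold_eq sentence.toList [] []]
  have h0 : PySem.Chars.split₀.go sentence.toList [] [] = PySem.Chars.split₀ sentence.toList := rfl
  rw [List.nil_append, h0, ← PySem.Str.split₀_map_toList, List.map_map]
  simp [Function.comp_def, -PySem.Str.split₀_map_toList]
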